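-- pv_equiv track=rewrite | github.com/miliar/Code_Jam_Webscraper | solutions_python/Problem_180/1055.py | solve
-- ===== SOURCE A (Python) =====
-- def solve(k,c,s):
--   if s < k:
--     return "IMPOSSIBLE"
--   if k == 2:
--     return "1 "+str(k**c)
--   tree = []
--   answer = ""
--   for i in range(1,k+1):
--     tree.append(i)
--   for i in range(c-1):
--     for j in range(1,len(tree)-1):
--       tree[j] = tree[j] + j*tree[len(tree)-1]
--     tree[len(tree)-1] = k**(i+2)
--   for i in range(len(tree)):
--     answer+=str(tree[i])+" "
--   return answer
-- ===== SOURCE B (Python) =====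
-- def solve(k, c, s):
--     if s < k:
--         return "IMPOSSIBLE"
--     if k == 2:
--         return "1 " + str(k**c)
--     if c <= 1 or k == 1:
--         # fewer than two rounds (or a single-key ring): the sequence is just 1..k
--         return "".join(str(j) + " " for j in range(1, k + 1))
--     # closed form of A's per-round update loop: each middle entry j gets
--     # j * (k + k^2 + ... + k^(c-1)) added, i.e. j * (k^c - k) / (k - 1)
--     p = pow(k, c)
--     q = (p - k) // (k - 1)
--     vals = [1] + [j + 1 + j * q for j in range(1, k - 1)] + [p]
--     return "".join(str(v) + " " for v in vals)
-- ===== Notes on version B (the rewrite author's own statement) =====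
-- stated objective: alternative
-- what changed: Replaces A's c-1 rounds of in-place list updates with a closed-form geometric sum per index (j*(k^c-k)/(k-1)+j+1) computed from a single pow(k,c); fewer bignum operations, though the result size itself dominates at scale.
-- outside the precondition, e.g. on solve(2, -1, 5): A returns '1 0.5', B returns '1 0.5'; on solve(0, 2, 10): A raises IndexError, B returns '1 0 '
import Mathlib
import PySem

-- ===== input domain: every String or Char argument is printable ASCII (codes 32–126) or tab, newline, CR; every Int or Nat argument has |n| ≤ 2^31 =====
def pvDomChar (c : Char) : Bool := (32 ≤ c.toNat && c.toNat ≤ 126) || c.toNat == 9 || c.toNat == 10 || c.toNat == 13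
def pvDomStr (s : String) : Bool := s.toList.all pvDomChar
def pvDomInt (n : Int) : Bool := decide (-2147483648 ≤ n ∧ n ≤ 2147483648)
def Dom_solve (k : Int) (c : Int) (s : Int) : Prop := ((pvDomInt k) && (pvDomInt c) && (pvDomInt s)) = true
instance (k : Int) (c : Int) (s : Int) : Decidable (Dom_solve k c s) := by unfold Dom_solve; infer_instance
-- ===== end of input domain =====

-- B replaces A's c-1 rounds of in-place list updates by a closed-form geometric sum per index
-- (j*(k^c-k)/(k-1)+j+1) from a single power; objective: alternative algorithm.


-- ===== PORT A =====
-- inner loop: for j in range(1,len(tree)-1): tree[j] = tree[j] + j*tree[len(tree)-1]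
def solveInner (t : List Int) : List Int :=
  (PySem.List.pyRange 1 ((t.length : Int) - 1)).foldl
    (fun u j => u.set j.toNat
        (PySem.List.pyGetD u j 0 + j * PySem.List.pyGetD u ((u.length : Int) - 1) 0)) t

-- one iteration of the outer loop: the inner loop, then tree[len(tree)-1] = k**(i+2)
def solveStep (k : Int) (t : List Int) (i : Int) : List Int :=
  let t' := solveInner t
  t'.set (t'.length - 1) (k ^ (i + 2).toNat)

def solve (k : Int) (c : Int) (s : Int) : String :=
  if s < k then "IMPOSSIBLE"
  else if k = 2 then "1 " ++ PySem.Int.toStr (k ^ c.toNat)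
  else
    let tree0 := (PySem.List.pyRange 1 (k + 1)).foldl (fun t i => t ++ [i]) []
    let tree := (PySem.List.pyRange 0 (c - 1)).foldl (solveStep k) tree0
    (PySem.List.pyRange 0 (tree.length : Int)).foldl
      (fun a i => a ++ PySem.Int.toStr (PySem.List.pyGetD tree i 0) ++ " ") ""

-- ===== PORT B =====
def solve_alt (k : Int) (c : Int) (s : Int) : String :=
  if s < k then "IMPOSSIBLE"
  else if k = 2 then "1 " ++ PySem.Int.toStr (k ^ c.toNat)
  else if c ≤ 1 ∨ k = 1 then
    PySem.Str.join "" ((PySem.List.pyRange 1 (k + 1)).map (fun j => PySem.Int.toStr j ++ " "))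
  else
    let p := k ^ c.toNat
    let q := PySem.Int.floordiv (p - k) (k - 1)
    let vals := [(1 : Int)] ++ (PySem.List.pyRange 1 (k - 1)).map (fun j => j + 1 + j * q) ++ [p]
    PySem.Str.join "" (vals.map (fun v => PySem.Int.toStr v ++ " "))

-- ===== PRECONDITION & SPEC =====
-- Pre_ excludes (a) k = 2 with c < 0, where A returns a float-formatted string ("1 0.5"),
-- not an integer sequence, and (b) k ≤ 0 with c ≥ 2, where A raises IndexError on the empty tree.
def Pre_solve (k : Int) (c : Int) (s : Int) : Prop :=
  ¬ (k = 2 ∧ c < 0) ∧ ¬ (k ≤ 0 ∧ 2 ≤ c)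
instance (k : Int) (c : Int) (s : Int) : Decidable (Pre_solve k c s) := by
  unfold Pre_solve; infer_instance
def pvWitness_solve : Int × Int × Int := (5, 3, 10)

def Spec_solve (k : Int) (c : Int) (s : Int) (out : String) : Prop := out = solve_alt k c s
instance (k : Int) (c : Int) (s : Int) (out : String) : Decidable (Spec_solve k c s out) := by
  unfold Spec_solve; infer_instance

-- ===== CLAIM (what is proved, stated in full; the proofs are below) =====
def Claim_equal_solve : Prop :=
  ∀ (k : Int) (c : Int) (s : Int), Dom_solve k c s → Pre_solve k c s → Spec_solve k c s (solve k c s)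

-- ===== LEMMAS AND PROOFS =====

-- "".join s::l peels one string off the front
theorem pv_join_empty_cons (s : String) (l : List String) :
    PySem.Str.join "" (s :: l) = s ++ PySem.Str.join "" l := by
  cases l with
  | nil => simp [PySem.Str.join, PySem.Chars.join, List.intercalate]
  | cons b t => simp [PySem.Str.join, PySem.Chars.join_cons_cons]

-- "".join over a mapped list is A's string-accumulating loop
theorem pv_joinfold (f : Int → String) (l : List Int) : ∀ acc : String,
    acc ++ PySem.Str.join "" (l.map f) = l.foldl (fun a x => a ++ f x) acc := by
  induction l with
  | nil => intro acc; simp [PySem.Str.join, PySem.Chars.join, List.intercalate]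
  | cons x t ih =>
      intro acc
      simp only [List.map_cons, pv_join_empty_cons, List.foldl_cons, ← ih, String.append_assoc]

-- A's output loop over the final tree, as a join
theorem pv_out_eq_join (tree : List Int) :
    (PySem.List.pyRange 0 (tree.length : Int)).foldl
      (fun a i => a ++ PySem.Int.toStr (PySem.List.pyGetD tree i 0) ++ " ") ""
    = PySem.Str.join "" (tree.map (fun v => PySem.Int.toStr v ++ " ")) := by
  rw [PySem.List.foldl_pyRange_zero_pyGetD' tree 0
      (fun a x => a ++ PySem.Int.toStr x ++ " ") ""]
  simp only [String.append_assoc]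
  rw [← pv_joinfold (fun v => PySem.Int.toStr v ++ " ") tree ""]
  simp

-- geometric sum  S n = k + k^2 + … + k^n
def pvGeom (k : Int) : Nat → Int
  | 0 => 0
  | n + 1 => pvGeom k n + k ^ (n + 1)

theorem pvGeom_mul (k : Int) (n : Nat) : (k - 1) * pvGeom k n = k ^ (n + 1) - k := by
  induction n with
  | zero => simp [pvGeom]
  | succ n ih => simp only [pvGeom]; ring_nf; ring_nf at ih; linarith [ih]

theorem pv_getD_mid (pre R : List Int) (x d : Int) (i : Int) (h0 : 0 ≤ i)
    (hi : i.toNat = pre.length) :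
    PySem.List.pyGetD (pre ++ (x :: R)) i d = x := by
  rw [PySem.List.pyGetD_eq_getElem _ d h0 (by simp; omega)]
  rw [List.getElem_append_right (by omega)]
  simp [hi]

theorem pv_getD_last (pre R : List Int) (x y d : Int) :
    PySem.List.pyGetD (pre ++ (x :: (R ++ [y])))
      (((pre ++ (x :: (R ++ [y]))).length : Int) - 1) d = y := by
  rw [show pre ++ (x :: (R ++ [y])) = (pre ++ x :: R) ++ [y] by simp]
  rw [PySem.List.pyGetD_eq_getElem _ d (by simp; omega) (by simp)]
  rw [List.getElem_append_right (by simp; omega)]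
  simp

theorem pv_set_mid (pre R : List Int) (x y : Int) (i : Nat) (hi : i = pre.length) :
    (pre ++ (x :: R)).set i y = pre ++ (y :: R) := by
  subst hi; simp

-- the inner loop on a list  pre ++ (range m (m+n)).map f ++ [last]  adds j*last at index j
theorem pv_inner_gen (last : Int) (f : Int → Int) (n : Nat) :
    ∀ (m : Int) (pre : List Int), 1 ≤ m → pre.length = m.toNat →
    (PySem.List.pyRange m (m + n)).foldl
      (fun u j => u.set j.toNat
        (PySem.List.pyGetD u j 0 + j * PySem.List.pyGetD u ((u.length : Int) - 1) 0))
      (pre ++ (PySem.List.pyRange m (m + n)).map f ++ [last])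
    = pre ++ (PySem.List.pyRange m (m + n)).map (fun j => f j + j * last) ++ [last] := by
  induction n with
  | zero =>
      intro m pre _ _
      rw [PySem.List.pyRange_one_eq_nil (by omega)]
      simp
  | succ n ih =>
      intro m pre h1 h2
      have hcast : (((n + 1 : Nat)) : Int) = (n : Int) + 1 := by push_cast; ring
      have hcons : PySem.List.pyRange m (m + ((n + 1 : Nat) : Int)) =
          m :: PySem.List.pyRange (m + 1) ((m + 1) + (n : Int)) := by
        rw [hcast, show m + ((n : Int) + 1) = (m + 1) + (n : Int) by ring]
        exact PySem.List.pyRange_one_cons (by omega)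
      rw [hcons]
      simp only [List.map_cons, List.foldl_cons, List.append_assoc, List.cons_append]
      rw [pv_getD_mid pre _ (f m) 0 m (by omega) (by omega)]
      rw [pv_getD_last pre _ (f m) last 0]
      rw [pv_set_mid pre _ (f m) (f m + m * last) m.toNat (by omega)]
      have hresoc : pre ++ ((f m + m * last) ::
            ((PySem.List.pyRange (m + 1) ((m + 1) + (n : Int))).map f ++ [last]))
          = (pre ++ [f m + m * last]) ++
            ((PySem.List.pyRange (m + 1) ((m + 1) + (n : Int))).map f ++ [last]) := by
        simp
      rw [hresoc]
      have ihn := ih (m + 1) (pre ++ [f m + m * last]) (by omega) (by simp [h2]; omega)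
      simp only [List.append_assoc, List.cons_append, List.nil_append] at ihn ⊢
      rw [ihn]

-- the tree after some rounds: [1, 2+S, 3+2S, …, (k-1)+(k-2)S, last]
def pvTree (k S last : Int) : List Int :=
  [1] ++ (PySem.List.pyRange 1 (k - 1)).map (fun j => j + 1 + j * S) ++ [last]

theorem pv_step (k : Int) (hk : 3 ≤ k) (S : Int) (t : Nat) (i : Int) :
    solveStep k (pvTree k S (k ^ (t + 1))) i
      = pvTree k (S + k ^ (t + 1)) (k ^ (i + 2).toNat) := by
  have hlen : (pvTree k S (k ^ (t + 1))).length = 1 + (k - 2).toNat + 1 := by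
    simp [pvTree, PySem.List.length_pyRange_one]
    omega
  have hrange : ((1 : Int) + ((k - 2).toNat : Int)) = k - 1 := by omega
  have hinner : solveInner (pvTree k S (k ^ (t + 1)))
      = [1] ++ (PySem.List.pyRange 1 (k - 1)).map
          (fun j => (j + 1 + j * S) + j * k ^ (t + 1)) ++ [k ^ (t + 1)] := by
    unfold solveInner
    rw [hlen]
    have hb : ((((1 + (k - 2).toNat + 1) : Nat) : Int) - 1) = 1 + ((k - 2).toNat : Int) := by
      push_cast; ring
    rw [hb]
    have := pv_inner_gen (k ^ (t + 1)) (fun j => j + 1 + j * S) ((k - 2).toNat) 1 [1]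
      (by omega) (by simp)
    rw [show pvTree k S (k ^ (t + 1))
        = [1] ++ (PySem.List.pyRange 1 (1 + ((k-2).toNat : Int))).map (fun j => j + 1 + j * S)
          ++ [k ^ (t + 1)] by rw [hrange]; rfl]
    rw [this, hrange]
  show (solveInner (pvTree k S (k ^ (t + 1)))).set
      ((solveInner (pvTree k S (k ^ (t + 1)))).length - 1) (k ^ (i + 2).toNat)
      = pvTree k (S + k ^ (t + 1)) (k ^ (i + 2).toNat)
  rw [hinner]
  have hlen2 : ([1] ++ (PySem.List.pyRange 1 (k - 1)).map
      (fun j => (j + 1 + j * S) + j * k ^ (t + 1)) ++ [k ^ (t + 1)]).length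
      = (k - 1).toNat + 1 := by
    simp [PySem.List.length_pyRange_one]; omega
  rw [hlen2]
  rw [show ([1] ++ (PySem.List.pyRange 1 (k - 1)).map
      (fun j => (j + 1 + j * S) + j * k ^ (t + 1)) ++ [k ^ (t + 1)])
      = ([1] ++ (PySem.List.pyRange 1 (k - 1)).map
      (fun j => (j + 1 + j * S) + j * k ^ (t + 1))) ++ [k ^ (t + 1)] by simp]
  have hlen3 : ([1] ++ (PySem.List.pyRange 1 (k - 1)).map
      (fun j => (j + 1 + j * S) + j * k ^ (t + 1))).length = (k - 1).toNat := by
    simp [PySem.List.length_pyRange_one]; omega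
  rw [show (k - 1).toNat + 1 - 1 = ([1] ++ (PySem.List.pyRange 1 (k - 1)).map
      (fun j => (j + 1 + j * S) + j * k ^ (t + 1))).length by rw [hlen3]; omega]
  rw [List.set_append_right _ _ (by omega)]
  simp only [List.length_append, Nat.sub_self, List.set_cons_zero]
  unfold pvTree
  congr 1
  · congr 1
    apply List.map_congr_left
    intro j _
    ring

theorem pv_outer (k : Int) (hk : 3 ≤ k) (n : Nat) :
    (PySem.List.pyRange 0 (n : Int)).foldl (solveStep k) (pvTree k 0 k)
      = pvTree k (pvGeom k n) (k ^ (n + 1)) := by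
  induction n with
  | zero => simp [PySem.List.pyRange_one_eq_nil, pvGeom]
  | succ n ih =>
      have hsplit : PySem.List.pyRange 0 ((n + 1 : Nat) : Int)
          = PySem.List.pyRange 0 (n : Int) ++ [(n : Int)] := by
        rw [show (((n + 1 : Nat)) : Int) = (n : Int) + 1 by push_cast; ring]
        exact PySem.List.pyRange_one_succ_right (by omega)
      rw [hsplit, List.foldl_append, ih, List.foldl_cons, List.foldl_nil]
      rw [pv_step k hk _ n (n : Int)]
      rw [show (((n : Int) + 2).toNat) = n + 2 by omega]
      rfl

theorem pv_init (k : Int) (hk : 3 ≤ k) :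
    PySem.List.pyRange 1 (k + 1) = pvTree k 0 k := by
  unfold pvTree
  rw [PySem.List.pyRange_one_append 1 2 (k + 1) (by omega) (by omega),
      PySem.List.pyRange_one_append 2 k (k + 1) (by omega) (by omega)]
  rw [show PySem.List.pyRange 1 2 = [1] from by
        rw [show (2 : Int) = 1 + 1 by ring]; exact PySem.List.pyRange_one_singleton 1,
      show PySem.List.pyRange k (k + 1) = [k] from PySem.List.pyRange_one_singleton k]
  rw [PySem.List.pyRange_one 2 k, PySem.List.pyRange_one 1 (k - 1)]
  simp only [List.map_map, List.cons_append, List.nil_append]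
  congr 1
  rw [show ((k - 1 - 1).toNat) = (k - 2).toNat by omega]
  congr 1
  apply List.map_congr_left
  intro t _
  simp
  ring

theorem pv_fold_one (l : List Int) : l.foldl (solveStep 1) [1] = [1] := by
  induction l with
  | nil => rfl
  | cons x t ih =>
      rw [List.foldl_cons]
      have : solveStep 1 [1] x = [1] := by
        simp [solveStep, solveInner, PySem.List.pyRange_one_eq_nil]
      rw [this, ih]

-- ===== VERDICT (by name: the statement is the Claim_ definition above) =====
theorem solve_spec : Claim_equal_solve := by
  intro k c s _ hpre
  obtain ⟨hp1, hp2⟩ := hpre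
  unfold Spec_solve solve solve_alt
  by_cases hs : s < k
  · simp only [if_pos hs]
  · simp only [if_neg hs]
    by_cases hk2 : k = 2
    · simp only [if_pos hk2]
    · simp only [if_neg hk2]
      rw [PySem.List.foldl_append_singleton_eq_self, List.nil_append]
      by_cases hck : c ≤ 1 ∨ k = 1
      · simp only [if_pos hck]
        rcases hck with hc1 | hk1
        · -- fewer than two rounds: the outer loop is empty, the tree stays 1..k
          rw [PySem.List.pyRange_one_eq_nil (a := 0) (by omega), List.foldl_nil,
              pv_out_eq_join]
        · -- k = 1: the tree is [1] and every round rewrites it to [1]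
          subst hk1
          by_cases hc1 : c ≤ 1
          · rw [PySem.List.pyRange_one_eq_nil (a := 0) (by omega), List.foldl_nil,
                pv_out_eq_join]
          · rw [show PySem.List.pyRange 1 (1 + 1) = [1] from
                PySem.List.pyRange_one_singleton 1]
            rw [pv_fold_one, pv_out_eq_join]
      · simp only [if_neg hck]
        push_neg at hck
        obtain ⟨hc2, hk1⟩ := hck
        have hk3 : 3 ≤ k := by
          rcases lt_or_ge 0 k with h | h
          · omega
          · exfalso; exact hp2 ⟨by omega, by omega⟩
        rw [pv_init k hk3]
        have hn : (c - 1) = (((c - 1).toNat : Nat) : Int) := by omega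
        rw [hn, pv_outer k hk3 ((c - 1).toNat), pv_out_eq_join]
        congr 1
        have hq : PySem.Int.floordiv (k ^ c.toNat - k) (k - 1) = pvGeom k ((c - 1).toNat) := by
          rw [PySem.Int.floordiv_eq_iff_of_pos (by omega)]
          have := pvGeom_mul k ((c - 1).toNat)
          rw [show (c - 1).toNat + 1 = c.toNat by omega] at this
          constructor
          · nlinarith [this]
          · nlinarith [this]
        have hlast : k ^ ((c - 1).toNat + 1) = k ^ c.toNat := by
          rw [show (c - 1).toNat + 1 = c.toNat by omega]
        unfold pvTree
        rw [hq, hlast]
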